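-- pv_equiv track=rewrite | github.com/KrissKisov/SoftUni | 02.Programming-Fundamentals-with-Python/05. Lists Advanced/03. Lists Advanced - More Exercises/02_take_skip_rope.py | hidden_message
-- ===== SOURCE A (Python) =====
-- def hidden_message(given_string: str) -> str:
--     numbers_list = [int(symbol) for symbol in given_string if symbol.isnumeric()]
--     non_numbers_list = [symbol for symbol in given_string if not symbol.isnumeric()]
--
--     take_list = [numbers_list[number] for number in range(len(numbers_list)) if number % 2 == 0]
--     skip_list = [numbers_list[number] for number in range(len(numbers_list)) if number % 2 != 0]
--     result_string = ""
--     start_index = 0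
--     for i in range(len(take_list)):
--         to_take = take_list[i]
--         if start_index + to_take > 0:
--             taken_string = "".join(non_numbers_list[start_index:start_index+to_take])
--             result_string += taken_string
--         to_skip = skip_list[i]
--         start_index += to_skip + to_take
--     return result_string
-- ===== SOURCE B (Python) =====
-- def hidden_message(given_string: str) -> str:
--     chars = []
--     bounds = [0]
--     for c in given_string:
--         if c.isnumeric():
--             bounds.append(bounds[-1] + int(c))
--         else:
--             chars.append(c)
--     pieces = [''.join(chars[bounds[i]:bounds[i + 1]]) for i in range(0, len(bounds) - 1, 2)]
--     return ''.join(pieces)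
-- ===== Notes on version B (the rewrite author's own statement) =====
-- stated objective: alternative
-- what changed: B never walks take/skip pairs with a running offset: in one pass over the string it collects the non-digit characters and builds a cumulative boundary array (prefix sums of the digits), then joins the character slices between even-indexed boundary pairs; dropping the two range-filter passes and the quadratic-prone string += gives a constant-factor speedup.
import Mathlib
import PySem

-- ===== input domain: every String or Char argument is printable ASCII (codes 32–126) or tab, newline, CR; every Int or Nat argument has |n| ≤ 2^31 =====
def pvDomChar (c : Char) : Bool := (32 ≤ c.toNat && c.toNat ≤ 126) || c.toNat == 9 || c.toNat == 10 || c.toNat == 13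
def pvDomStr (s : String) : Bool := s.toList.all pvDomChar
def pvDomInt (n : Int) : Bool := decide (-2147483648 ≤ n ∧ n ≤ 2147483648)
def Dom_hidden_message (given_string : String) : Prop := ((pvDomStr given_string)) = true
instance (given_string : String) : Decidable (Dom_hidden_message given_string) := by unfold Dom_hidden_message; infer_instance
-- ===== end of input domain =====

-- B replaces A's take/skip pair walk with a cumulative boundary array (prefix sums of the
-- digits) built in one pass, joining the character slices between even boundary pairs
-- (objective: alternative).


-- ===== PORT A =====
-- On the printable-ASCII domain, `symbol.isnumeric()` is exactly Char.isDigit and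
-- `int(symbol)` on such a digit is its code point minus 48 — exact on Dom.
def hidden_message (given_string : String) : String :=
  let numbers_list : List Int :=
    (given_string.toList.filter (fun c => c.isDigit)).map (fun c => ((c.toNat : Int) - 48))
  let non_numbers_list : List Char :=
    given_string.toList.filter (fun c => !c.isDigit)
  let take_list : List Int :=
    ((PySem.List.pyRange 0 (PySem.List.len numbers_list) 1).filter
      (fun n => PySem.Int.mod n 2 == 0)).map (fun n => PySem.List.pyGetD numbers_list n 0)
  let skip_list : List Int :=
    ((PySem.List.pyRange 0 (PySem.List.len numbers_list) 1).filter
      (fun n => PySem.Int.mod n 2 != 0)).map (fun n => PySem.List.pyGetD numbers_list n 0)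
  let final :=
    (PySem.List.pyRange 0 (PySem.List.len take_list) 1).foldl
      (fun (st : String × Int) i =>
        let to_take := PySem.List.pyGetD take_list i 0
        let st1 := if st.2 + to_take > 0 then
            st.1 ++ String.ofList (PySem.List.slice non_numbers_list (some st.2) (some (st.2 + to_take)))
          else st.1
        let to_skip := PySem.List.pyGetD skip_list i 0
        (st1, st.2 + to_skip + to_take)) ("", 0)
  final.1

-- ===== PORT B =====
-- bounds[-1] is PySem.List.pyGet? … (-1); bounds[i] / bounds[i+1] are always in range
-- (i ranges below len(bounds)-1), so the .getD 0 default is never taken.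
def hidden_message_alt (given_string : String) : String :=
  let st := given_string.toList.foldl
    (fun (st : List Char × List Int) c =>
      if c.isDigit then
        (st.1, st.2 ++ [(PySem.List.pyGet? st.2 (-1)).getD 0 + ((c.toNat : Int) - 48)])
      else
        (st.1 ++ [c], st.2))
    ([], [0])
  let chars := st.1
  let bounds := st.2
  let pieces := (PySem.List.pyRange 0 (PySem.List.len bounds - 1) 2).map
    (fun i => String.ofList (PySem.List.slice chars
      (some ((PySem.List.pyGet? bounds i).getD 0))
      (some ((PySem.List.pyGet? bounds (i + 1)).getD 0))))
  PySem.Str.join "" pieces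

-- ===== PRECONDITION & SPEC =====
-- Pre_ excludes strings with an odd number of digit characters: there A raises IndexError
-- (skip_list[i] past the end).
def Pre_hidden_message (given_string : String) : Prop :=
  (given_string.toList.filter (fun c => c.isDigit)).length % 2 = 0
instance (given_string : String) : Decidable (Pre_hidden_message given_string) := by
  unfold Pre_hidden_message; infer_instance
def pvWitness_hidden_message : String := "a1b2c3d4"
def Spec_hidden_message (given_string : String) (out : String) : Prop := out = hidden_message_alt given_string
instance (given_string : String) (out : String) : Decidable (Spec_hidden_message given_string out) := by unfold Spec_hidden_message; infer_instance

-- ===== CLAIM (what is proved, stated in full; the proofs are below) =====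
def Claim_equal_hidden_message : Prop := ∀ (given_string : String), Dom_hidden_message given_string → Pre_hidden_message given_string → Spec_hidden_message given_string (hidden_message given_string)

-- ===== LEMMAS AND PROOFS =====

def pvNums (l : List Char) : List Int :=
  (l.filter (fun c => c.isDigit)).map (fun c => ((c.toNat : Int) - 48))
def pvChars (l : List Char) : List Char := l.filter (fun c => !c.isDigit)
def pvBnds (acc : Int) : List Int → List Int
  | [] => []
  | d :: ds => (acc + d) :: pvBnds (acc + d) ds

theorem pv_mod2_cast (j : Nat) : PySem.Int.mod (j:Int) 2 = ((j % 2 : Nat) : Int) := by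
  exact_mod_cast PySem.Int.mod_natCast j 2

theorem pv_evensRange (n : Nat) :
    (PySem.List.pyRange 0 (n:Int) 1).filter (fun i => PySem.Int.mod i 2 == 0)
      = (PySem.List.pyRange 0 (((n+1)/2 : Nat) : Int) 1).map (fun j => 2*j) := by
  induction n with
  | zero => simp [PySem.List.pyRange_one_eq_nil]
  | succ n ih =>
    rw [show ((n+1:Nat):Int) = (n:Int)+1 by push_cast; ring,
        PySem.List.pyRange_one_succ_right (by positivity), List.filter_append, ih]
    rcases Nat.even_or_odd n with ⟨m, rfl⟩ | ⟨m, rfl⟩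
    · have h1 : ((m + m + 1 + 1) / 2 : Nat) = m + 1 := by omega
      have h2 : ((m + m + 1) / 2 : Nat) = m := by omega
      rw [h1, h2, show ((m+1:Nat):Int) = (m:Int)+1 by push_cast; ring,
          PySem.List.pyRange_one_succ_right (by positivity), List.map_append]
      have hc : (PySem.Int.mod ((m+m : Nat):Int) 2 == 0) = true := by
        rw [pv_mod2_cast]; simp; omega
      simp only [List.filter_cons, List.filter_nil, hc]
      push_cast; ring_nf; simp
    · have h1 : ((2*m + 1 + 1 + 1) / 2 : Nat) = m + 1 := by omega
      have h2 : ((2*m + 1 + 1) / 2 : Nat) = m + 1 := by omega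
      rw [h1, h2]
      have hc : (PySem.Int.mod ((2*m+1 : Nat):Int) 2 == 0) = false := by
        rw [pv_mod2_cast]; simp
      simp only [List.filter_cons, List.filter_nil, hc]
      simp

theorem pv_oddsRange (n : Nat) :
    (PySem.List.pyRange 0 (n:Int) 1).filter (fun i => PySem.Int.mod i 2 != 0)
      = (PySem.List.pyRange 0 ((n/2 : Nat) : Int) 1).map (fun j => 2*j+1) := by
  induction n with
  | zero => simp [PySem.List.pyRange_one_eq_nil]
  | succ n ih =>
    rw [show ((n+1:Nat):Int) = (n:Int)+1 by push_cast; ring,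
        PySem.List.pyRange_one_succ_right (by positivity), List.filter_append, ih]
    rcases Nat.even_or_odd n with ⟨m, rfl⟩ | ⟨m, rfl⟩
    · have h1 : ((m + m + 1) / 2 : Nat) = m := by omega
      have h2 : ((m + m) / 2 : Nat) = m := by omega
      rw [h1, h2]
      have hc : (PySem.Int.mod ((m+m : Nat):Int) 2 != 0) = false := by
        rw [pv_mod2_cast]; simp; omega
      simp only [List.filter_cons, List.filter_nil, hc]
      simp
    · have h1 : ((2*m + 1 + 1) / 2 : Nat) = m + 1 := by omega
      have h2 : ((2*m + 1) / 2 : Nat) = m := by omega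
      rw [h1, h2, show ((m+1:Nat):Int) = (m:Int)+1 by push_cast; ring,
          PySem.List.pyRange_one_succ_right (by positivity), List.map_append]
      have hc : (PySem.Int.mod ((2*m+1 : Nat):Int) 2 != 0) = true := by
        rw [pv_mod2_cast]; simp
      simp only [List.filter_cons, List.filter_nil, hc]
      push_cast; ring_nf; simp

theorem pv_join_empty (L : List String) :
    PySem.Str.join "" L = String.ofList ((L.map String.toList).flatten) := by
  rw [show PySem.Str.join "" L = String.ofList (PySem.Str.join "" L).toList from
        (String.ofList_toList).symm, PySem.Str.toList_join]
  congr 1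
  show [].intercalate (L.map String.toList) = _
  induction L with
  | nil => rfl
  | cons h t ih =>
    cases t with
    | nil => simp [List.intercalate]
    | cons h2 t2 =>
      simp only [List.map_cons, List.intercalate, List.intersperse_cons₂,
        List.flatten_cons, List.nil_append] at *
      rw [ih]

theorem pv_join_empty_append (L : List String) (p : String) :
    PySem.Str.join "" (L ++ [p]) = PySem.Str.join "" L ++ p := by
  rw [pv_join_empty, pv_join_empty, List.map_append, List.flatten_append]
  simp [String.ofList_append]

theorem pv_getD_nonneg (xs : List Int) (h : ∀ x ∈ xs, 0 ≤ x) (i : Int) :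
    0 ≤ PySem.List.pyGetD xs i 0 := by
  unfold PySem.List.pyGetD
  cases h2 : PySem.List.pyGet? xs i with
  | none => simp
  | some v =>
    simpa using h v (PySem.List.mem_of_pyGet?_eq_some xs h2)

-- A's fold over the take/skip pairs: running offset is the partial pair-sum, and the
-- accumulated string is the join of the per-pair slices.
theorem pv_main (cs : List Char) (t s : Nat → Int)
    (ht : ∀ j, 0 ≤ t j) (hs : ∀ j, 0 ≤ s j) (k : Nat) :
    (((List.range k).foldl (fun (st : String × Int) j =>
        (if st.2 + t j > 0 then
            st.1 ++ String.ofList (PySem.List.slice cs (some st.2) (some (st.2 + t j)))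
          else st.1, st.2 + s j + t j)) ("", 0)).2
      = ((List.range k).map (fun j => t j + s j)).sum)
    ∧ 0 ≤ (((List.range k).foldl (fun (st : String × Int) j =>
        (if st.2 + t j > 0 then
            st.1 ++ String.ofList (PySem.List.slice cs (some st.2) (some (st.2 + t j)))
          else st.1, st.2 + s j + t j)) ("", 0)).2)
    ∧ (((List.range k).foldl (fun (st : String × Int) j =>
        (if st.2 + t j > 0 then
            st.1 ++ String.ofList (PySem.List.slice cs (some st.2) (some (st.2 + t j)))
          else st.1, st.2 + s j + t j)) ("", 0)).1
      = PySem.Str.join "" ((List.range k).map (fun j =>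
          String.ofList (PySem.List.slice cs
            (some (((List.range j).map (fun i => t i + s i)).sum))
            (some (((List.range j).map (fun i => t i + s i)).sum + t j)))))) := by
  induction k with
  | zero => refine ⟨rfl, le_refl 0, ?_⟩; rfl
  | succ k ih =>
    obtain ⟨h2, hnn, h1⟩ := ih
    rw [List.range_succ, List.foldl_append, List.map_append, List.map_append]
    simp only [List.foldl_cons, List.foldl_nil, List.map_cons, List.map_nil, List.sum_append,
      List.sum_cons, List.sum_nil]
    refine ⟨by rw [h2]; ring, by have := ht k; have := hs k; omega, ?_⟩
    rw [pv_join_empty_append, ← h1, h2]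
    by_cases hg : ((List.range k).map (fun j => t j + s j)).sum + t k > 0
    · rw [if_pos hg]
    · rw [if_neg hg]
      have h0 : ((List.range k).map (fun j => t j + s j)).sum = 0 ∧ t k = 0 := by
        rw [h2] at hnn; have := ht k; omega
      rw [h0.1, h0.2]
      have hsl : PySem.List.slice cs none (some (0:Int)) = ([] : List Char) := by
        rw [PySem.List.slice_to cs (le_refl 0)]; simp
      simp [hsl]

-- A reduced to the canonical join-of-slices form (endpoints: pair partial sums).
theorem pv_coreA (nums : List Int) (cs : List Char) (hnn : ∀ x ∈ nums, 0 ≤ x)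
    (m : Nat) (hn : nums.length = 2*m) :
    (((PySem.List.pyRange 0
        (PySem.List.len (((PySem.List.pyRange 0 (PySem.List.len nums) 1).filter
          (fun n => PySem.Int.mod n 2 == 0)).map (fun n => PySem.List.pyGetD nums n 0))) 1).foldl
      (fun (st : String × Int) i =>
        (if st.2 + PySem.List.pyGetD (((PySem.List.pyRange 0 (PySem.List.len nums) 1).filter
            (fun n => PySem.Int.mod n 2 == 0)).map (fun n => PySem.List.pyGetD nums n 0)) i 0 > 0 then
           st.1 ++ String.ofList (PySem.List.slice cs (some st.2)
             (some (st.2 + PySem.List.pyGetD (((PySem.List.pyRange 0 (PySem.List.len nums) 1).filter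
               (fun n => PySem.Int.mod n 2 == 0)).map (fun n => PySem.List.pyGetD nums n 0)) i 0)))
         else st.1,
         st.2 + PySem.List.pyGetD (((PySem.List.pyRange 0 (PySem.List.len nums) 1).filter
           (fun n => PySem.Int.mod n 2 != 0)).map (fun n => PySem.List.pyGetD nums n 0)) i 0
            + PySem.List.pyGetD (((PySem.List.pyRange 0 (PySem.List.len nums) 1).filter
           (fun n => PySem.Int.mod n 2 == 0)).map (fun n => PySem.List.pyGetD nums n 0)) i 0))
      ("", 0)).1)
    = PySem.Str.join "" ((List.range m).map (fun (k : Nat) =>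
        String.ofList (PySem.List.slice cs
          (some (((List.range k).map (fun (i : Nat) =>
            PySem.List.pyGetD nums (2*(i:Int)) 0 + PySem.List.pyGetD nums (2*(i:Int)+1) 0)).sum))
          (some (((List.range k).map (fun (i : Nat) =>
            PySem.List.pyGetD nums (2*(i:Int)) 0 + PySem.List.pyGetD nums (2*(i:Int)+1) 0)).sum
              + PySem.List.pyGetD nums (2*(k:Int)) 0))))) := by
  have hlen : PySem.List.len nums = ((2*m : Nat) : Int) := by simp [pysem, hn]
  have hTL2 : ((PySem.List.pyRange 0 (PySem.List.len nums) 1).filter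
        (fun n => PySem.Int.mod n 2 == 0)).map (fun n => PySem.List.pyGetD nums n 0)
      = (List.range m).map (fun (k : Nat) => PySem.List.pyGetD nums (2*(k:Int)) 0) := by
    rw [hlen, pv_evensRange (2*m), List.map_map]
    have h2 : ((2*m+1)/2 : Nat) = m := by omega
    rw [h2, PySem.List.pyRange_one, List.map_map,
        show (((m:Int) - 0).toNat) = m by omega]
    simp [Function.comp]
  have hSL2 : ((PySem.List.pyRange 0 (PySem.List.len nums) 1).filter
        (fun n => PySem.Int.mod n 2 != 0)).map (fun n => PySem.List.pyGetD nums n 0)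
      = (List.range m).map (fun (k : Nat) => PySem.List.pyGetD nums (2*(k:Int)+1) 0) := by
    rw [hlen, pv_oddsRange (2*m), List.map_map]
    have h2 : ((2*m)/2 : Nat) = m := by omega
    rw [h2, PySem.List.pyRange_one, List.map_map,
        show (((m:Int) - 0).toNat) = m by omega]
    simp [Function.comp]
  have hTLlen : PySem.List.len ((List.range m).map
      (fun (k : Nat) => PySem.List.pyGetD nums (2*(k:Int)) 0)) = (m:Int) := by
    simp [pysem]
  rw [hTL2, hSL2, hTLlen]
  rw [PySem.List.pyRange_one 0 (m:Int),
      show (((m:Int) - 0).toNat) = m by omega,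
      List.foldl_map]
  have ht : ∀ j : Nat, 0 ≤ PySem.List.pyGetD nums (2*(j:Int)) 0 :=
    fun j => pv_getD_nonneg nums hnn _
  have hs : ∀ j : Nat, 0 ≤ PySem.List.pyGetD nums (2*(j:Int)+1) 0 :=
    fun j => pv_getD_nonneg nums hnn _
  have hT : ∀ k : Nat, PySem.List.pyGetD ((List.range m).map
      (fun (j : Nat) => PySem.List.pyGetD nums (2*(j:Int)) 0)) (k:Int) 0
      = PySem.List.pyGetD nums (2*(k:Int)) 0 := by
    intro k
    rw [PySem.List.pyGetD_natCast]
    by_cases hk : k < m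
    · rw [PySem.List.getD_map_range _ _ _ _ hk]
    · have h1 : nums.length ≤ 2*k := by omega
      have h3 : PySem.List.pyGetD nums (2*(k:Int)) 0 = 0 := by
        rw [show (2*(k:Int)) = (((2*k : Nat) : Int)) by push_cast; ring,
            PySem.List.pyGetD_natCast, List.getD_eq_getElem?_getD, List.getElem?_eq_none h1]
        rfl
      rw [h3, List.getD_eq_getElem?_getD, List.getElem?_eq_none (by simp; omega)]
      rfl
  have hS : ∀ k : Nat, PySem.List.pyGetD ((List.range m).map
      (fun (j : Nat) => PySem.List.pyGetD nums (2*(j:Int)+1) 0)) (k:Int) 0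
      = PySem.List.pyGetD nums (2*(k:Int)+1) 0 := by
    intro k
    rw [PySem.List.pyGetD_natCast]
    by_cases hk : k < m
    · rw [PySem.List.getD_map_range _ _ _ _ hk]
    · have h1 : nums.length ≤ 2*k+1 := by omega
      have h3 : PySem.List.pyGetD nums (2*(k:Int)+1) 0 = 0 := by
        rw [show (2*(k:Int)+1) = (((2*k+1 : Nat) : Int)) by push_cast; ring,
            PySem.List.pyGetD_natCast, List.getD_eq_getElem?_getD, List.getElem?_eq_none h1]
        rfl
      rw [h3, List.getD_eq_getElem?_getD, List.getElem?_eq_none (by simp; omega)]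
      rfl
  simp only [zero_add]
  simp only [hT, hS]
  exact (pv_main cs (fun j => PySem.List.pyGetD nums (2*(j:Int)) 0)
    (fun j => PySem.List.pyGetD nums (2*(j:Int)+1) 0) ht hs m).2.2

-- B's single pass over the string produces the non-digit characters and the boundary list.
theorem pv_foldB (l : List Char) : ∀ (cl : List Char) (bl : List Int) (h : bl ≠ []),
    l.foldl (fun (st : List Char × List Int) c =>
      if c.isDigit then
        (st.1, st.2 ++ [(PySem.List.pyGet? st.2 (-1)).getD 0 + ((c.toNat : Int) - 48)])
      else
        (st.1 ++ [c], st.2)) (cl, bl)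
    = (cl ++ pvChars l, bl ++ pvBnds (bl.getLast h) (pvNums l)) := by
  induction l with
  | nil => intro cl bl h; simp [pvChars, pvNums, pvBnds]
  | cons c l ih =>
    intro cl bl h
    simp only [List.foldl_cons]
    by_cases hd : c.isDigit
    · rw [if_pos hd]
      have hlast : (PySem.List.pyGet? bl (-1)).getD 0 = bl.getLast h := by
        rw [PySem.List.pyGet?_neg_one, List.getLast?_eq_some_getLast]
        rfl
      rw [hlast, ih cl (bl ++ [bl.getLast h + ((c.toNat : Int) - 48)]) (by simp)]
      have : (bl ++ [bl.getLast h + ((c.toNat : Int) - 48)]).getLast (by simp)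
          = bl.getLast h + ((c.toNat : Int) - 48) := List.getLast_concat
      rw [this]
      simp only [pvChars, pvNums, List.filter_cons, hd]
      simp [pvBnds]
    · rw [if_neg hd]
      rw [ih (cl ++ [c]) bl h]
      simp only [pvChars, pvNums, List.filter_cons]
      simp [hd]

theorem pv_bnds_len (nums : List Int) : ∀ acc, (pvBnds acc nums).length = nums.length := by
  induction nums with
  | nil => intro acc; rfl
  | cons d ds ih => intro acc; simp [pvBnds, ih]

theorem pv_bnds_get (nums : List Int) : ∀ (acc : Int) (j : Nat), j < nums.length →
    (pvBnds acc nums).getD j 0 = acc + (nums.take (j+1)).sum := by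
  induction nums with
  | nil => intro acc j hj; simp at hj
  | cons d ds ih =>
    intro acc j hj
    cases j with
    | zero => simp [pvBnds]
    | succ j =>
      simp only [pvBnds, List.getD_cons_succ, List.take_succ_cons, List.sum_cons]
      rw [ih (acc + d) j (by simpa using hj)]
      ring

theorem pv_bound (nums : List Int) (i : Nat) (hi : i ≤ nums.length) :
    (0 :: pvBnds 0 nums).getD i 0 = (nums.take i).sum := by
  cases i with
  | zero => simp
  | succ i =>
    simp only [List.getD_cons_succ]
    rw [pv_bnds_get nums 0 i (by omega)]
    ring

theorem pv_take_succ_sum (xs : List Int) (i : Nat) (h : i < xs.length) :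
    (xs.take (i+1)).sum = (xs.take i).sum + xs.getD i 0 := by
  rw [List.getD_eq_getElem?_getD, List.getElem?_eq_getElem h]
  simpa using List.sum_take_succ xs i h

-- partial pair-sums ARE the even prefix sums
theorem pv_pairSum (nums : List Int) (m : Nat) (hn : nums.length = 2*m) :
    ∀ k, k ≤ m →
    ((List.range k).map (fun (i : Nat) =>
        PySem.List.pyGetD nums (2*(i:Int)) 0 + PySem.List.pyGetD nums (2*(i:Int)+1) 0)).sum
      = (nums.take (2*k)).sum := by
  intro k
  induction k with
  | zero => intro _; simp
  | succ k ih =>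
    intro hk
    rw [List.range_succ, List.map_append, List.sum_append]
    rw [ih (by omega)]
    simp only [List.map_cons, List.map_nil, List.sum_cons, List.sum_nil, add_zero]
    have e1 : PySem.List.pyGetD nums (2*(k:Int)) 0 = nums.getD (2*k) 0 := by
      rw [show (2*(k:Int)) = (((2*k : Nat) : Int)) by push_cast; ring,
          PySem.List.pyGetD_natCast]
    have e2 : PySem.List.pyGetD nums (2*(k:Int)+1) 0 = nums.getD (2*k+1) 0 := by
      rw [show (2*(k:Int)+1) = (((2*k+1 : Nat) : Int)) by push_cast; ring,
          PySem.List.pyGetD_natCast]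
    rw [e1, e2, show 2*(k+1) = (2*k+1)+1 by ring,
        pv_take_succ_sum nums (2*k+1) (by omega),
        pv_take_succ_sum nums (2*k) (by omega)]
    ring

set_option maxHeartbeats 1000000 in
theorem pv_assemble (given_string : String) (hpre : Pre_hidden_message given_string) :
    hidden_message given_string = hidden_message_alt given_string := by
  unfold Pre_hidden_message at hpre
  set nums := pvNums given_string.toList with hnumsdef
  set cs := pvChars given_string.toList with hcsdef
  obtain ⟨m, hm⟩ : ∃ m, nums.length = 2*m := by
    refine ⟨(given_string.toList.filter (fun c => c.isDigit)).length / 2, ?_⟩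
    simp only [hnumsdef, pvNums, List.length_map]
    omega
  have hnn : ∀ x ∈ nums, 0 ≤ x := by
    intro x hx
    obtain ⟨c, hc, rfl⟩ := List.mem_map.mp hx
    have hd : c.isDigit = true := (List.mem_filter.mp hc).2
    have h48 : 48 ≤ c.toNat := by
      simp [Char.isDigit] at hd
      exact hd.1
    omega
  -- A side
  have hA : hidden_message given_string
      = PySem.Str.join "" ((List.range m).map (fun k =>
          String.ofList (PySem.List.slice cs
            (some ((nums.take (2*k)).sum))
            (some ((nums.take (2*k+1)).sum))))) := by
    rw [show hidden_message given_string = _ from pv_coreA nums cs hnn m hm]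
    congr 1
    apply List.map_congr_left
    intro k hk
    have hk' : k < m := List.mem_range.mp hk
    have e1 : PySem.List.pyGetD nums (2*(k:Int)) 0 = nums.getD (2*k) 0 := by
      rw [show (2*(k:Int)) = (((2*k : Nat) : Int)) by push_cast; ring,
          PySem.List.pyGetD_natCast]
    rw [pv_pairSum nums m hm k (by omega), e1,
        pv_take_succ_sum nums (2*k) (by omega)]
  -- B side
  have hB : hidden_message_alt given_string
      = PySem.Str.join "" ((List.range m).map (fun k =>
          String.ofList (PySem.List.slice cs
            (some ((nums.take (2*k)).sum))
            (some ((nums.take (2*k+1)).sum))))) := by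
    show PySem.Str.join "" _ = _
    rw [pv_foldB given_string.toList [] [0] (by simp)]
    congr 1
    have hblen : ((0 : Int) :: pvBnds 0 nums).length = 2*m+1 := by
      simp [pv_bnds_len, hm]
    -- compute the range bound: len bounds - 1 = 2*m
    have hlen2 : PySem.List.len (((0:Int)) :: pvBnds 0 nums) - 1 = ((2*m : Nat) : Int) := by
      show (((((0:Int)) :: pvBnds 0 nums).length : Int)) - 1 = _
      rw [hblen]; push_cast; ring
    have hglast : (([(0:Int)]).getLast (by simp)) = (0:Int) := rfl
    simp only [List.nil_append, hglast]
    show ((PySem.List.pyRange 0 (PySem.List.len ((0:Int) :: pvBnds 0 nums) - 1) 2).map _) = _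
    rw [hlen2]
    rw [PySem.List.pyRange_of_pos 0 ((2*m:Nat):Int) (by norm_num : (0:Int) < 2),
        show (if (0:Int) < ((2*m:Nat):Int) then ((((2*m:Nat):Int) - 0 + 2 - 1)/2).toNat else 0) = m by
          split <;> omega,
        List.map_map]
    simp only [List.singleton_append, ← hnumsdef, ← hcsdef]
    apply List.map_congr_left
    intro k hk
    have hk' : k < m := List.mem_range.mp hk
    have hidx : ∀ (i : Nat), i ≤ 2*m →
        (PySem.List.pyGet? ((0:Int) :: pvBnds 0 nums) ((i:Nat) : Int)).getD 0
          = (nums.take i).sum := by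
      intro i hi
      rw [PySem.List.pyGet?_natCast]
      rw [show (((0:Int) :: pvBnds 0 nums)[i]?).getD 0 = ((0:Int) :: pvBnds 0 nums).getD i 0 from
            List.getD_eq_getElem?_getD.symm]
      exact pv_bound nums i (by omega)
    have c1 : ((0:Int) + 2*(k:Int)) = (((2*k : Nat)) : Int) := by push_cast; ring
    have c2 : (((2*k : Nat) : Int) + 1) = (((2*k+1 : Nat)) : Int) := by push_cast; ring
    simp only [Function.comp]
    rw [c1, c2, hidx (2*k) (by omega), hidx (2*k+1) (by omega)]
  rw [hA, hB]

-- ===== VERDICT (by name: the statement is the Claim_ definition above) =====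
theorem hidden_message_spec : Claim_equal_hidden_message := by
  intro s _ hpre
  exact pv_assemble s hpre
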